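-- pv_equiv track=rewrite | github.com/ZR-Huang/AlgorithmsPractices | 1269.py | table_v2
-- ===== SOURCE A (Python) =====
-- def table_v2(arrLen, steps):
--     # create table
--     # Time : 0.085m
--     j_max = min(steps, arrLen)
--     result_table = [[0 for _ in range(j_max)] for _ in range(steps+1)]
--     result_table[0][0] = 1
--     MOD = 10**9 + 7
--
--     for i in range(1, steps+1):
--         result_table[i][0] = (result_table[i-1][0] + result_table[i-1][1]) % MOD
--         for j in range(1, j_max-1):
--             result_table[i][j] = (result_table[i-1][j-1] + result_table[i-1][j] + \
--                 result_table[i-1][j+1]) % MOD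
--         result_table[i][j_max-1] = (result_table[i-1][j_max-2] + result_table[i-1][j_max-1]) % MOD
--
--     return result_table[-1][0]
-- ===== SOURCE B (Python) =====
-- def table_v2(arrLen, steps):
--     # answer = (T ** steps)[0][0] where T is the tridiagonal reflecting
--     # transition matrix on min(steps, arrLen) positions; binary matrix exponentiation.
--     MOD = 10 ** 9 + 7
--     n = min(steps, arrLen)
--     mat = [[1 if abs(i - j) <= 1 else 0 for j in range(n)] for i in range(n)]
--
--     def mul(A, B):
--         return [[sum(A[i][k] * B[k][j] for k in range(n)) % MOD
--                  for j in range(n)] for i in range(n)]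
--
--     res = [[1 if i == j else 0 for j in range(n)] for i in range(n)]
--     e = steps
--     while e > 0:
--         if e & 1:
--             res = mul(res, mat)
--         mat = mul(mat, mat)
--         e >>= 1
--     return res[0][0]
-- ===== Notes on version B (the rewrite author's own statement) =====
-- stated objective: alternative
-- what changed: B replaces A's (steps x j_max) dynamic-programming table filled row by row with binary exponentiation of the tridiagonal transition matrix, returning (T^steps)[0][0] mod 10^9+7.
import Mathlib
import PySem

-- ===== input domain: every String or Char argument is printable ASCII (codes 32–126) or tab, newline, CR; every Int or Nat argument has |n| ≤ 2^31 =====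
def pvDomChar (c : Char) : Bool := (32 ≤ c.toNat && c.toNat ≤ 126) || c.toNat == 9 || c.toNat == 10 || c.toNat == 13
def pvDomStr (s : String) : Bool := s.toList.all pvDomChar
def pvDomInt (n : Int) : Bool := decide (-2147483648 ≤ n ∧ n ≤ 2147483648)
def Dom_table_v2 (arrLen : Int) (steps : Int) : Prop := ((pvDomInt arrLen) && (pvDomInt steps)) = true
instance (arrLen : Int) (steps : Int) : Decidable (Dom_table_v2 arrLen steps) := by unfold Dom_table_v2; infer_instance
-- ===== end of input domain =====

-- B replaces A's step-by-step DP over the table by binary matrix exponentiation of the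
-- tridiagonal transition matrix: answer = (T^steps)[0][0]; a different algorithm, not faster
-- on inputs where the matrix dimension grows with the input.

-- ===== PORT A =====
-- helper: xs[i] with default (indices are in range on every input admitted by Pre_)
def pvG (l : List Int) (i : Int) : Int := PySem.List.pyGetD l i 0

-- the body of A's outer loop: row i computed from row i-1 (prev); writes to the pre-allocated
-- zero row cover exactly indices 0, 1..j_max-2, j_max-1, so the finished row is rebuilt as a list
def pvRowA (jmax : Int) (prev : List Int) : List Int :=
  ((pvG prev 0 + pvG prev 1) % 1000000007) ::
    ((PySem.List.pyRange 1 (jmax - 1) 1).map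
        (fun j => (pvG prev (j - 1) + pvG prev j + pvG prev (j + 1)) % 1000000007)
      ++ [(pvG prev (jmax - 2) + pvG prev (jmax - 1)) % 1000000007])

-- one outer-loop iteration on the table: append the freshly written row (result_table[i-1] is the last row so far)
def pvFa (jmax : Int) (tbl : List (List Int)) : List (List Int) :=
  tbl ++ [pvRowA jmax (PySem.List.pyGetD tbl (-1) [])]

def table_v2 (arrLen : Int) (steps : Int) : Int :=
  let jmax := min steps arrLen
  -- result_table rows 1..steps are overwritten in order; row 0 is [0]*j_max with [0][0] = 1
  let row0 := PySem.List.pySetD (List.replicate jmax.toNat 0) 0 1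
  let table := (PySem.List.pyRange 1 (steps + 1) 1).foldl (fun tbl _i => pvFa jmax tbl) [row0]
  pvG (PySem.List.pyGetD table (-1) []) 0

-- ===== PORT B =====
-- B's helpers: M[i][j] (indices produced by range(n), always in range), n×n matmul mod p,
-- and the while-loop of binary exponentiation (e >>= 1 on a nonnegative e is e / 2)
def pvMG (M : List (List Int)) (i j : Int) : Int :=
  PySem.List.pyGetD (PySem.List.pyGetD M i []) j 0

def pvMul (n : Int) (A B : List (List Int)) : List (List Int) :=
  (PySem.List.pyRange 0 n 1).map (fun i =>
    (PySem.List.pyRange 0 n 1).map (fun j =>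
      ((PySem.List.pyRange 0 n 1).foldl (fun s k => s + pvMG A i k * pvMG B k j) 0) % 1000000007))

def pvPowLoop (n : Int) (R M : List (List Int)) (e : Nat) : List (List Int) :=
  if e = 0 then R
  else pvPowLoop n (if e % 2 = 1 then pvMul n R M else R) (pvMul n M M) (e / 2)
  termination_by e
  decreasing_by exact Nat.div_lt_self (Nat.pos_of_ne_zero (by assumption)) (by omega)

def table_v2_alt (arrLen : Int) (steps : Int) : Int :=
  let n := min steps arrLen
  let mat := (PySem.List.pyRange 0 n 1).map (fun i =>
    (PySem.List.pyRange 0 n 1).map (fun j => if |i - j| ≤ 1 then (1 : Int) else 0))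
  let res := (PySem.List.pyRange 0 n 1).map (fun i =>
    (PySem.List.pyRange 0 n 1).map (fun j => if i = j then (1 : Int) else 0))
  pvMG (pvPowLoop n res mat steps.toNat) 0 0

-- ===== PRECONDITION & SPEC =====
-- A raises IndexError whenever steps < 2 or arrLen < 2 (empty table, empty rows, or a read of
-- prev[1] in a row of length 1); Pre_ excludes exactly those inputs, on which A returns nothing.
def Pre_table_v2 (arrLen : Int) (steps : Int) : Prop := 2 ≤ arrLen ∧ 2 ≤ steps
instance (arrLen : Int) (steps : Int) : Decidable (Pre_table_v2 arrLen steps) := by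
  unfold Pre_table_v2; infer_instance

def pvWitness_table_v2 : Int × Int := (5, 4)

def Spec_table_v2 (arrLen : Int) (steps : Int) (out : Int) : Prop := out = table_v2_alt arrLen steps
instance (arrLen : Int) (steps : Int) (out : Int) : Decidable (Spec_table_v2 arrLen steps out) := by
  unfold Spec_table_v2; infer_instance

-- ===== CLAIM (what is proved, stated in full; the proofs are below) =====
def Claim_equal_table_v2 : Prop := ∀ (arrLen : Int) (steps : Int), Dom_table_v2 arrLen steps → Pre_table_v2 arrLen steps → Spec_table_v2 arrLen steps (table_v2 arrLen steps)

-- ===== LEMMAS AND PROOFS =====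

-- Both final values are reduced mod p = 10^9+7; equality in ZMod p plus the range gives Int equality.
theorem pv_cast_mod (a : Int) : ((a % 1000000007 : Int) : ZMod 1000000007) = (a : ZMod 1000000007) :=
  ZMod.intCast_mod a 1000000007

theorem pv_int_eq_of_cast (a b : Int) (h : 0 ≤ a) (ha : a < 1000000007) (hb : 0 ≤ b)
    (hb2 : b < 1000000007) (h2 : (a : ZMod 1000000007) = (b : ZMod 1000000007)) : a = b := by
  have := (ZMod.intCast_eq_intCast_iff' a b 1000000007).mp h2
  rwa [show ((1000000007 : Nat) : Int) = 1000000007 from rfl, Int.emod_eq_of_lt h ha,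
    Int.emod_eq_of_lt hb hb2] at this

-- abstract layer: matrices over ZMod p
def pvMatOf (m : Nat) (M : List (List Int)) : Matrix (Fin m) (Fin m) (ZMod 1000000007) :=
  Matrix.of fun i j => ((pvMG M (i.1 : Int) (j.1 : Int) : Int) : ZMod 1000000007)

def pvVecOf (m : Nat) (v : List Int) : Fin m → ZMod 1000000007 :=
  fun i => ((pvG v (i.1 : Int) : Int) : ZMod 1000000007)

def pvT (m : Nat) : Matrix (Fin m) (Fin m) (ZMod 1000000007) :=
  Matrix.of fun i j => if |(i.1 : Int) - (j.1 : Int)| ≤ 1 then 1 else 0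

theorem pv_mul_entry (m : Nat) (A B : List (List Int)) (i j : Nat) (hi : i < m) (hj : j < m) :
    pvMG (pvMul (m : Int) A B) (i : Int) (j : Int)
      = ((List.range m).map (fun k : Nat => pvMG A i k * pvMG B k j)).sum % 1000000007 := by
  show PySem.List.pyGetD (PySem.List.pyGetD (pvMul (m : Int) A B) (i : Int) []) (j : Int) 0 = _
  unfold pvMul
  rw [PySem.List.pyGetD_map_pyRange _ m i _ hi, PySem.List.pyGetD_map_pyRange _ m j _ hj,
    PySem.List.foldl_add, PySem.List.pyRange_zero_nat, List.map_map]
  norm_num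
  rfl

theorem pv_matOf_mul (m : Nat) (A B : List (List Int)) :
    pvMatOf m (pvMul (m : Int) A B) = pvMatOf m A * pvMatOf m B := by
  ext i j
  rw [Matrix.mul_apply]
  show ((pvMG (pvMul (m : Int) A B) (i.1 : Int) (j.1 : Int) : Int) : ZMod 1000000007) = _
  rw [pv_mul_entry m A B i.1 j.1 i.2 j.2, pv_cast_mod, Int.cast_list_sum, List.map_map]
  have hls : ((List.range m).map (Int.cast ∘ fun k : Nat =>
        pvMG A (i.1 : Int) (k : Int) * pvMG B (k : Int) (j.1 : Int))).sum
      = ∑ k ∈ Finset.range m,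
          ((pvMG A (i.1 : Int) (k : Int) * pvMG B (k : Int) (j.1 : Int) : Int)
            : ZMod 1000000007) := rfl
  rw [hls, ← Fin.sum_univ_eq_sum_range (fun k : Nat =>
    ((pvMG A (i.1 : Int) (k : Int) * pvMG B (k : Int) (j.1 : Int) : Int) : ZMod 1000000007)) m]
  exact Finset.sum_congr rfl fun k _ => by
    show ((pvMG A (i.1 : Int) (k.1 : Int) * pvMG B (k.1 : Int) (j.1 : Int) : Int)
        : ZMod 1000000007) = _
    rw [Int.cast_mul]
    rfl

theorem pv_matOf_powLoop (m : Nat) : ∀ (e : Nat) (R M : List (List Int)),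
    pvMatOf m (pvPowLoop (m : Int) R M e) = pvMatOf m R * (pvMatOf m M) ^ e := by
  intro e
  induction e using Nat.strong_induction_on with
  | _ e ih =>
    intro R M
    rw [pvPowLoop]
    by_cases he : e = 0
    · simp [he]
    · rw [if_neg he, ih (e / 2) (Nat.div_lt_self (Nat.pos_of_ne_zero he) one_lt_two),
        pv_matOf_mul]
      have he2 : e = e % 2 + 2 * (e / 2) := by omega
      by_cases hp : e % 2 = 1
      · rw [if_pos hp, pv_matOf_mul, ← pow_two, ← pow_mul, mul_assoc, ← pow_succ',
          show 2 * (e / 2) + 1 = e by omega]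
      · rw [if_neg hp, ← pow_two, ← pow_mul, show 2 * (e / 2) = e by omega]

-- the two literal matrices B builds
theorem pv_matOf_id (m : Nat) :
    pvMatOf m ((PySem.List.pyRange 0 (m : Int) 1).map (fun i =>
      (PySem.List.pyRange 0 (m : Int) 1).map (fun j => if i = j then (1 : Int) else 0))) = 1 := by
  ext i j
  show ((pvMG _ (i.1 : Int) (j.1 : Int) : Int) : ZMod 1000000007) = (1 : Matrix _ _ _) i j
  rw [Matrix.one_apply]
  unfold pvMG
  rw [PySem.List.pyGetD_map_pyRange _ m i.1 _ i.2, PySem.List.pyGetD_map_pyRange _ m j.1 _ j.2]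
  by_cases h : i = j
  · subst h; simp
  · rw [if_neg (by exact_mod_cast fun hc => h (Fin.ext hc)), if_neg h]
    simp

theorem pv_matOf_T (m : Nat) :
    pvMatOf m ((PySem.List.pyRange 0 (m : Int) 1).map (fun i =>
      (PySem.List.pyRange 0 (m : Int) 1).map (fun j => if |i - j| ≤ 1 then (1 : Int) else 0)))
      = pvT m := by
  ext i j
  show ((pvMG _ (i.1 : Int) (j.1 : Int) : Int) : ZMod 1000000007)
      = if |(i.1 : Int) - (j.1 : Int)| ≤ 1 then 1 else 0
  unfold pvMG
  rw [PySem.List.pyGetD_map_pyRange _ m i.1 _ i.2, PySem.List.pyGetD_map_pyRange _ m j.1 _ j.2]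
  split_ifs <;> simp

-- A's row update is multiplication by pvT: the mulVec sum, indexed over Finset.range,
-- collapses to the three neighbour terms, which is exactly A's boundary-cased row formula.
theorem pv_rhs1 (m : Nat) (v : List Int) (i : Fin m) :
    (pvT m).mulVec (pvVecOf m v) i
      = ∑ k ∈ Finset.range m, (if |(i.1 : Int) - (k : Int)| ≤ 1 then
          ((pvG v (k : Int) : Int) : ZMod 1000000007) else 0) := by
  rw [← Fin.sum_univ_eq_sum_range (fun k : Nat => if |(i.1 : Int) - (k : Int)| ≤ 1 then
    ((pvG v (k : Int) : Int) : ZMod 1000000007) else 0) m]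
  simp [Matrix.mulVec, dotProduct, pvT, pvVecOf]

theorem pv_rhs2 (m : Nat) (i : Fin m) (W : Nat → ZMod 1000000007) :
    ∑ k ∈ Finset.range m, (if |(i.1 : Int) - (k : Int)| ≤ 1 then W k else 0)
      = (if 1 ≤ i.1 then W (i.1 - 1) else 0) + W i.1 + (if i.1 + 1 < m then W (i.1 + 1) else 0) := by
  have h1 : ∀ k ∈ Finset.range m,
      (if |(i.1 : Int) - (k : Int)| ≤ 1 then W k else 0)
        = ((if k = i.1 - 1 then (if 1 ≤ i.1 then W k else 0) else 0)
            + (if k = i.1 then W k else 0) + (if k = i.1 + 1 then W k else 0)) := by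
    intro k _
    obtain ⟨iv, hiv⟩ := i
    simp only [abs_le]
    split_ifs <;> first | (exfalso; omega) | ring
  rw [Finset.sum_congr rfl h1, Finset.sum_add_distrib, Finset.sum_add_distrib,
    Finset.sum_ite_eq' (Finset.range m) (i.1 - 1), Finset.sum_ite_eq' (Finset.range m) i.1,
    Finset.sum_ite_eq' (Finset.range m) (i.1 + 1)]
  have := i.2
  simp only [Finset.mem_range]
  rw [if_pos (by omega : i.1 - 1 < m), if_pos this]

theorem pv_lhs_eval (m : Nat) (hm : 2 ≤ m) (v : List Int) (i : Fin m) :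
    ((pvG (pvRowA (m : Int) v) (i.1 : Int) : Int) : ZMod 1000000007)
      = (if 1 ≤ i.1 then ((pvG v ((i.1 - 1 : Nat) : Int) : Int) : ZMod 1000000007) else 0)
        + ((pvG v (i.1 : Int) : Int) : ZMod 1000000007)
        + (if i.1 + 1 < m then ((pvG v ((i.1 + 1 : Nat) : Int) : Int) : ZMod 1000000007) else 0) := by
  obtain ⟨iv, hiv⟩ := i
  simp only [Fin.val_mk]
  have hmid : ((PySem.List.pyRange 1 ((m : Int) - 1) 1).map
      (fun j => (pvG v (j - 1) + pvG v j + pvG v (j + 1)) % 1000000007)).length = m - 2 := by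
    simp [PySem.List.length_pyRange_one]
    omega
  rw [show pvG (pvRowA (m : Int) v) (iv : Int)
      = (pvRowA (m : Int) v).getD iv 0 from PySem.List.pyGetD_natCast _ _ _]
  by_cases h0 : iv = 0
  · subst h0
    rw [pvRowA, List.getD_cons_zero, pv_cast_mod, if_neg (by omega), if_pos (by omega)]
    push_cast
    ring
  · obtain ⟨t, rfl⟩ : ∃ t, iv = t + 1 := ⟨iv - 1, by omega⟩
    rw [pvRowA, List.getD_cons_succ]
    have hlen : (((PySem.List.pyRange 1 ((m : Int) - 1) 1).map
        (fun j => (pvG v (j - 1) + pvG v j + pvG v (j + 1)) % 1000000007))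
          ++ [(pvG v ((m : Int) - 2) + pvG v ((m : Int) - 1)) % 1000000007]).length = m - 1 := by
      rw [List.length_append, hmid]; simp; omega
    rw [List.getD_eq_getElem _ _ (by rw [hlen]; omega)]
    by_cases ht : t < m - 2
    · rw [List.getElem_append_left (by rw [hmid]; omega), List.getElem_map,
        PySem.List.getElem_pyRange_one]
      rw [show (1 : Int) + (t : Nat) - 1 = ((t : Nat) : Int) by omega,
        show (1 : Int) + (t : Nat) = ((t + 1 : Nat) : Int) by push_cast; omega,
        show ((t + 1 : Nat) : Int) + 1 = ((t + 2 : Nat) : Int) by push_cast; omega]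
      rw [pv_cast_mod, if_pos (by omega), if_pos (by omega)]
      rw [show t + 1 - 1 = t by omega, show t + 1 + 1 = t + 2 by omega]
      push_cast
      ring
    · have ht2 : t = m - 2 := by omega
      rw [List.getElem_append_right (by rw [hmid]; omega)]
      rw [List.getElem_singleton]
      rw [show ((m : Nat) : Int) - 2 = ((m - 2 : Nat) : Int) by omega,
        show ((m : Nat) : Int) - 1 = ((m - 1 : Nat) : Int) by omega]
      rw [pv_cast_mod, if_pos (by omega), if_neg (by omega)]
      rw [show t + 1 - 1 = m - 2 by omega, show t + 1 = m - 1 by omega]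
      push_cast
      ring

theorem pv_row_mulVec (m : Nat) (hm : 2 ≤ m) (v : List Int) :
    pvVecOf m (pvRowA (m : Int) v) = (pvT m).mulVec (pvVecOf m v) := by
  funext i
  show ((pvG (pvRowA (m : Int) v) (i.1 : Int) : Int) : ZMod 1000000007) = _
  rw [pv_rhs1, pv_rhs2 m i (fun k : Nat => ((pvG v (k : Int) : Int) : ZMod 1000000007))]
  exact pv_lhs_eval m hm v i

theorem pv_vec_iter (m : Nat) (hm : 2 ≤ m) : ∀ (n : Nat) (v : List Int),
    pvVecOf m ((pvRowA (m : Int))^[n] v) = ((pvT m) ^ n).mulVec (pvVecOf m v) := by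
  intro n
  induction n with
  | zero => intro v; simp
  | succ n ih =>
      intro v
      rw [Function.iterate_succ_apply, ih (pvRowA (m : Int) v), pv_row_mulVec m hm v,
        Matrix.mulVec_mulVec, ← pow_succ]

-- folding a list while ignoring the elements is function iteration
theorem pv_foldl_const {α β : Type} (F : β → β) : ∀ (xs : List α) (init : β),
    xs.foldl (fun a _ => F a) init = F^[xs.length] init := by
  intro xs
  induction xs with
  | nil => intro init; rfl
  | cons x xs ih =>
      intro init
      simp [List.foldl_cons, ih, Function.iterate_succ_apply]

-- the last row of the iterated table is the iterate of pvRowA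
theorem pv_last_iter (jmax : Int) : ∀ (n : Nat) (tbl : List (List Int)),
    PySem.List.pyGetD ((pvFa jmax)^[n] tbl) (-1) []
      = (pvRowA jmax)^[n] (PySem.List.pyGetD tbl (-1) []) := by
  intro n
  induction n with
  | zero => intro tbl; rfl
  | succ n ih =>
      intro tbl
      rw [Function.iterate_succ_apply, ih, pvFa,
        PySem.List.pyGetD_neg_one_append_singleton]
      exact (Function.iterate_succ_apply _ _ _).symm

-- range facts: both programs end in a value reduced mod p
theorem pv_a_range (jmax : Int) (s : Nat) (hs : 1 ≤ s) (v : List Int) :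
    0 ≤ pvG ((pvRowA jmax)^[s] v) 0 ∧ pvG ((pvRowA jmax)^[s] v) 0 < 1000000007 := by
  obtain ⟨t, rfl⟩ : ∃ t, s = t + 1 := ⟨s - 1, by omega⟩
  rw [Function.iterate_succ_apply', pvRowA]
  rw [show pvG (((pvG ((pvRowA jmax)^[t] v) 0 + pvG ((pvRowA jmax)^[t] v) 1) % 1000000007) :: _) 0
      = (pvG ((pvRowA jmax)^[t] v) 0 + pvG ((pvRowA jmax)^[t] v) 1) % 1000000007 from
    PySem.List.pyGetD_zero_cons _ _ _]
  exact ⟨Int.emod_nonneg _ (by norm_num), Int.emod_lt_of_pos _ (by norm_num)⟩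

theorem pv_pow_ends_mul (n : Int) : ∀ (e : Nat), 1 ≤ e → ∀ (R M : List (List Int)),
    ∃ X Y, pvPowLoop n R M e = pvMul n X Y := by
  intro e
  induction e using Nat.strong_induction_on with
  | _ e ih =>
    intro he R M
    rw [pvPowLoop, if_neg (by omega)]
    by_cases h2 : e / 2 = 0
    · rw [pvPowLoop, if_pos h2]
      have : e % 2 = 1 := by omega
      rw [if_pos this]
      exact ⟨R, M, rfl⟩
    · exact ih (e / 2) (Nat.div_lt_self (by omega) one_lt_two) (by omega) _ _

theorem pv_b_range (m : Nat) (hm : 1 ≤ m) (e : Nat) (he : 1 ≤ e) (R M : List (List Int)) :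
    0 ≤ pvMG (pvPowLoop (m : Int) R M e) 0 0 ∧
      pvMG (pvPowLoop (m : Int) R M e) 0 0 < 1000000007 := by
  obtain ⟨X, Y, hXY⟩ := pv_pow_ends_mul (m : Int) e he R M
  rw [hXY, show ((0 : Int)) = ((0 : Nat) : Int) from rfl,
    pv_mul_entry m X Y 0 0 (by omega) (by omega)]
  exact ⟨Int.emod_nonneg _ (by norm_num), Int.emod_lt_of_pos _ (by norm_num)⟩

-- ===== VERDICT (by name: the statement is the Claim_ definition above) =====
theorem table_v2_spec : Claim_equal_table_v2 := by
  intro arrLen steps _hDom hPre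
  obtain ⟨hA, hS⟩ := hPre
  unfold Spec_table_v2 table_v2 table_v2_alt
  dsimp only
  have hjm : (2 : Int) ≤ min steps arrLen := le_min hS hA
  set jm := min steps arrLen with hjmdef
  have hmn : ((jm.toNat : Int)) = jm := Int.toNat_of_nonneg (by omega)
  set m := jm.toNat with hmdef
  have hm2 : 2 ≤ m := by omega
  -- A's fold over the table is an iterate of the row update
  rw [pv_foldl_const (pvFa jm), PySem.List.length_pyRange_one, pv_last_iter]
  have hrow0 : PySem.List.pyGetD [PySem.List.pySetD (List.replicate m 0) 0 1] (-1) []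
      = (1 : Int) :: List.replicate (m - 1) 0 := by
    have hsplit : List.replicate m (0 : Int) = 0 :: List.replicate (m - 1) 0 := by
      rw [← List.replicate_succ]; congr 1; omega
    rw [hsplit]
    simp [PySem.List.pyGetD, PySem.List.pyGet?, PySem.List.pyIdx?,
      PySem.List.pySetD, PySem.List.pySet?]
  rw [hrow0, show (steps + 1 - 1).toNat = steps.toNat by omega, ← hmn]
  have hs2 : 2 ≤ steps.toNat := by omega
  apply pv_int_eq_of_cast
  · exact (pv_a_range (m : Int) steps.toNat (by omega) _).1
  · exact (pv_a_range (m : Int) steps.toNat (by omega) _).2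
  · exact (pv_b_range m (by omega) steps.toNat (by omega) _ _).1
  · exact (pv_b_range m (by omega) steps.toNat (by omega) _ _).2
  · -- both casts equal the (0,0) entry of pvT m ^ steps
    have hAside : ((pvG ((pvRowA (m : Int))^[steps.toNat]
          ((1 : Int) :: List.replicate (m - 1) 0)) 0 : Int) : ZMod 1000000007)
        = ((pvT m) ^ steps.toNat) ⟨0, by omega⟩ ⟨0, by omega⟩ := by
      have hv : pvVecOf m ((pvRowA (m : Int))^[steps.toNat]
            ((1 : Int) :: List.replicate (m - 1) 0)) ⟨0, by omega⟩
          = ((pvT m) ^ steps.toNat).mulVec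
              (pvVecOf m ((1 : Int) :: List.replicate (m - 1) 0)) ⟨0, by omega⟩ := by
        rw [pv_vec_iter m hm2 steps.toNat]
      have hsingle : pvVecOf m ((1 : Int) :: List.replicate (m - 1) 0)
          = Pi.single (⟨0, by omega⟩ : Fin m) 1 := by
        funext i
        obtain ⟨iv, hiv⟩ := i
        show ((pvG ((1 : Int) :: List.replicate (m - 1) 0) ((iv : Nat) : Int) : Int)
            : ZMod 1000000007) = _
        rw [show pvG ((1 : Int) :: List.replicate (m - 1) 0) ((iv : Nat) : Int)
            = ((1 : Int) :: List.replicate (m - 1) 0).getD iv 0 from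
          PySem.List.pyGetD_natCast _ _ _]
        rcases iv with _ | t
        · simp
        · rw [List.getD_cons_succ]
          rw [Pi.single_apply, if_neg (by simp [Fin.ext_iff])]
          simp [List.getD]
      rw [hsingle] at hv
      have hms : ((pvT m) ^ steps.toNat).mulVec (Pi.single (⟨0, by omega⟩ : Fin m) 1)
            ⟨0, by omega⟩
          = ((pvT m) ^ steps.toNat) ⟨0, by omega⟩ ⟨0, by omega⟩ := by
        simp [Matrix.mulVec_single]
      rw [hms] at hv
      exact hv
    have hBside : ((pvMG (pvPowLoop (m : Int)
          ((PySem.List.pyRange 0 (m : Int) 1).map (fun i =>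
            (PySem.List.pyRange 0 (m : Int) 1).map (fun j => if i = j then (1 : Int) else 0)))
          ((PySem.List.pyRange 0 (m : Int) 1).map (fun i =>
            (PySem.List.pyRange 0 (m : Int) 1).map (fun j => if |i - j| ≤ 1 then (1 : Int) else 0)))
          steps.toNat) 0 0 : Int) : ZMod 1000000007)
        = ((pvT m) ^ steps.toNat) ⟨0, by omega⟩ ⟨0, by omega⟩ := by
      have := pv_matOf_powLoop m steps.toNat
        ((PySem.List.pyRange 0 (m : Int) 1).map (fun i =>
          (PySem.List.pyRange 0 (m : Int) 1).map (fun j => if i = j then (1 : Int) else 0)))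
        ((PySem.List.pyRange 0 (m : Int) 1).map (fun i =>
          (PySem.List.pyRange 0 (m : Int) 1).map (fun j => if |i - j| ≤ 1 then (1 : Int) else 0)))
      rw [pv_matOf_id, pv_matOf_T, one_mul] at this
      calc ((pvMG (pvPowLoop (m : Int) _ _ steps.toNat) 0 0 : Int) : ZMod 1000000007)
          = pvMatOf m (pvPowLoop (m : Int)
              ((PySem.List.pyRange 0 (m : Int) 1).map (fun i =>
                (PySem.List.pyRange 0 (m : Int) 1).map (fun j => if i = j then (1 : Int) else 0)))
              ((PySem.List.pyRange 0 (m : Int) 1).map (fun i =>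
                (PySem.List.pyRange 0 (m : Int) 1).map
                  (fun j => if |i - j| ≤ 1 then (1 : Int) else 0)))
              steps.toNat) ⟨0, by omega⟩ ⟨0, by omega⟩ := rfl
        _ = ((pvT m) ^ steps.toNat) ⟨0, by omega⟩ ⟨0, by omega⟩ := by rw [this]
    rw [hAside, hBside]
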